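-- pv_equiv track=rewrite | github.com/kbcao/leetcode | 面试题17 13/面试题17_13_xjf.py | respace
-- ===== SOURCE A (Python) =====
-- from typing import List
--
-- def respace(dictionary: List[str], sentence: str) -> int:
--     trie = {}
--     for word in dictionary:
--         t = trie
--         for c in word: t = t.setdefault(c, {})
--         t['len'] = len(word)
--     ls = len(sentence)
--     dp = [0] * (ls + 1)
--     for i in range(ls - 1, -1, -1):
--         dp[i] = dp[i + 1] + 1
--         t = trie
--         for j in range(i, ls):
--             if sentence[j] not in t: break
--             t = t[sentence[j]]
--             if 'len' not in t: continue
--             dp[i] = min(dp[i], dp[j + 1])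
--             if dp[i] == 0: break
--     return dp[0]
-- ===== SOURCE B (Python) =====
-- def respace(dictionary, sentence):
--     # Forward DP over prefix lengths with substring set-membership (no trie).
--     words = set(dictionary)
--     maxlen = max(map(len, dictionary), default=0)
--     n = len(sentence)
--     dp = [0] * (n + 1)
--     for i in range(1, n + 1):
--         best = dp[i - 1] + 1
--         for j in range(max(0, i - maxlen), i):
--             if sentence[j:i] in words:
--                 best = min(best, dp[j])
--         dp[i] = best
--     return dp[n]
-- ===== Notes on version B (the rewrite author's own statement) =====
-- stated objective: alternative
-- what changed: Replaces the trie plus right-to-left char-by-char walk with a forward DP over prefix lengths that tests window substrings against a hash set of words (window bounded by the longest word length).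
import Mathlib
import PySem

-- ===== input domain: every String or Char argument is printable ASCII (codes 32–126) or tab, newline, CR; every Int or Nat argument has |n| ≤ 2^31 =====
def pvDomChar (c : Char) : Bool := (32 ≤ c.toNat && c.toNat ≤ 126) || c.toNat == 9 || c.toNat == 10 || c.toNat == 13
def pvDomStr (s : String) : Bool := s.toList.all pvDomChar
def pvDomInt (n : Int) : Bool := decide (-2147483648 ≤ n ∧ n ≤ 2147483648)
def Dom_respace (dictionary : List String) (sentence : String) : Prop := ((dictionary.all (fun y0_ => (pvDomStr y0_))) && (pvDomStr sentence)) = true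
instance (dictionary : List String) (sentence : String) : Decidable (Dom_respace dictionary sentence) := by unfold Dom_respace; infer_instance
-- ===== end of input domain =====

-- B replaces the backward trie-walk DP with a forward DP testing window substrings against a set of words; return values proved equal on all inputs.


-- ===== PORT A =====
-- Python's trie is a nested dict with an extra 'len' key; ported as a mutual
-- inductive (tag = presence/value of 'len', kids = the char-keyed sub-dicts).
mutual
inductive PTrie : Type
  | mk : Option Int → PTrieKids → PTrie
inductive PTrieKids : Type
  | nil : PTrieKids
  | cons : Char → PTrie → PTrieKids → PTrieKids
end

def PTrie.lenTag : PTrie → Option Int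
  | .mk m _ => m

def PTrie.kids : PTrie → PTrieKids
  | .mk _ k => k

-- `sentence[j] in t` / `t[sentence[j]]` on the char keys
def PTrieKids.find? : PTrieKids → Char → Option PTrie
  | .nil, _ => none
  | .cons c t tl, c' => if c = c' then some t else PTrieKids.find? tl c'

-- `t = trie; for c in word: t = t.setdefault(c, {}); t['len'] = len(word)`
mutual
def trieInsert : PTrie → List Char → Int → PTrie
  | .mk _ ch, [], L => .mk (some L) ch
  | .mk m ch, c :: rest, L => .mk m (kidsInsert ch c rest L)
def kidsInsert : PTrieKids → Char → List Char → Int → PTrieKids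
  | .nil, c, rest, L => .cons c (trieInsert (.mk none .nil) rest L) .nil
  | .cons c' t tl, c, rest, L =>
      if c' = c then .cons c' (trieInsert t rest L) tl
      else .cons c' t (kidsInsert tl c rest L)
end

-- inner `for j in range(i, ls): …` with its two breaks, cur = dp[i]
def innerA (cs : List Char) (dp : List Int) : List Int → PTrie → Int → Int
  | [], _, cur => cur
  | j :: js, t, cur =>
    match PTrieKids.find? (PTrie.kids t) (PySem.List.pyGetD cs j ' ') with
    | none => cur                                   -- `if sentence[j] not in t: break`
    | some t' =>
      match PTrie.lenTag t' with
      | none => innerA cs dp js t' cur              -- `if 'len' not in t: continue`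
      | some _ =>
        let cur2 := min cur (PySem.List.pyGetD dp (j + 1) 0)
        if cur2 = 0 then cur2 else innerA cs dp js t' cur2

def respace (dictionary : List String) (sentence : String) : Int :=
  let trie := dictionary.foldl (fun t w => trieInsert t w.toList (PySem.Str.len w)) (.mk none .nil)
  let cs := sentence.toList
  let ls := PySem.Str.len sentence
  let dp0 : List Int := List.replicate (ls + 1).toNat 0
  let dp := (PySem.List.pyRange (ls - 1) (-1) (-1)).foldl (fun dp i =>
      let dp1 := PySem.List.pySetD dp i (PySem.List.pyGetD dp (i + 1) 0 + 1)
      PySem.List.pySetD dp1 i (innerA cs dp1 (PySem.List.pyRange i ls 1) trie (PySem.List.pyGetD dp1 i 0))) dp0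
  PySem.List.pyGetD dp 0 0

-- ===== PORT B =====
def respace_alt (dictionary : List String) (sentence : String) : Int :=
  let words : PySem.Set String := PySem.Set.ofList dictionary
  let maxlen : Int := (PySem.List.max? (dictionary.map PySem.Str.len) (fun x => x)).getD 0
  let n : Int := PySem.Str.len sentence
  let dp0 : List Int := List.replicate (n + 1).toNat 0
  let dp := (PySem.List.pyRange 1 (n + 1) 1).foldl (fun dp i =>
      let best := (PySem.List.pyRange (max 0 (i - maxlen)) i 1).foldl
        (fun best j =>
          if PySem.Set.contains words (PySem.Str.slice sentence (some j) (some i))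
          then min best (PySem.List.pyGetD dp j 0) else best)
        (PySem.List.pyGetD dp (i - 1) 0 + 1)
      PySem.List.pySetD dp i best) dp0
  PySem.List.pyGetD dp n 0

-- ===== PRECONDITION & SPEC =====
def Spec_respace (dictionary : List String) (sentence : String) (out : Int) : Prop := out = respace_alt dictionary sentence
instance (dictionary : List String) (sentence : String) (out : Int) : Decidable (Spec_respace dictionary sentence out) := by unfold Spec_respace; infer_instance

-- ===== CLAIM (what is proved, stated in full; the proofs are below) =====
def Claim_equal_respace : Prop := ∀ (dictionary : List String) (sentence : String), Dom_respace dictionary sentence → Spec_respace dictionary sentence (respace dictionary sentence)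

-- ===== LEMMAS AND PROOFS =====

/-- `mtch W cs j i`: the slice `cs[j:i]` is a dictionary word. -/
def mtch (W : List String) (cs : List Char) (j i : ℕ) : Prop :=
  j < i ∧ i ≤ cs.length ∧ String.ofList ((cs.drop j).take (i - j)) ∈ W

/-- A left-to-right parse of `cs[j:i]`: each step skips one char (cost 1)
or consumes a dictionary word (cost 0). -/
inductive Reach (W : List String) (cs : List Char) : ℕ → ℕ → Int → Prop
  | refl (i : ℕ) : Reach W cs i i 0
  | skip {j i : ℕ} {c : Int} : j < cs.length → Reach W cs (j+1) i c → Reach W cs j i (c+1)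
  | word {j k i : ℕ} {c : Int} : mtch W cs j k → Reach W cs k i c → Reach W cs j i c

theorem reach_trans {W : List String} {cs : List Char} {a b d : ℕ} {c c' : Int}
    (h1 : Reach W cs a b c) (h2 : Reach W cs b d c') : Reach W cs a d (c + c') := by
  induction h1 with
  | refl i => simpa using h2
  | @skip j i cc hlt _ ih =>
      have e : cc + 1 + c' = cc + c' + 1 := by ring
      rw [e]; exact Reach.skip hlt (ih h2)
  | word hm _ ih => exact Reach.word hm (ih h2)

/-- Both the backward value function `f` (indexed by suffix start) and the forward
value function `g` (indexed by prefix length) equal the optimum parse cost. -/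
theorem back_eq_forw (W : List String) (cs : List Char) (f g : ℕ → Int)
    (hfb : f cs.length = 0)
    (hfs : ∀ i, i < cs.length → f i ≤ f (i+1) + 1)
    (hfm : ∀ i j, mtch W cs i j → f i ≤ f j)
    (hfa : ∀ i, i < cs.length → f i = f (i+1) + 1 ∨ ∃ j, mtch W cs i j ∧ f i = f j)
    (hgb : g 0 = 0)
    (hgs : ∀ i, i < cs.length → g (i+1) ≤ g i + 1)
    (hgm : ∀ j i, mtch W cs j i → g i ≤ g j)
    (hga : ∀ i, i < cs.length → g (i+1) = g i + 1 ∨ ∃ j, mtch W cs j (i+1) ∧ g (i+1) = g j) :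
    f 0 = g cs.length := by
  have reach_f : ∀ {j i : ℕ} {c : Int}, Reach W cs j i c → f j ≤ f i + c := by
    intro j i c h
    induction h with
    | refl i => simp
    | skip hlt _ ih => have := hfs _ hlt; omega
    | word hm _ ih => have := hfm _ _ hm; omega
  have reach_g : ∀ {j i : ℕ} {c : Int}, Reach W cs j i c → g i ≤ g j + c := by
    intro j i c h
    induction h with
    | refl i => simp
    | skip hlt _ ih => have := hgs _ hlt; omega
    | word hm _ ih =>
        have := hgm _ _ hm; omega
  have reach_back : ∀ k i, i ≤ cs.length → cs.length - i = k → Reach W cs i cs.length (f i) := by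
    intro k
    induction k using Nat.strong_induction_on with
    | _ k IH =>
      intro i hi hk
      rcases Nat.eq_or_lt_of_le hi with he | hlt
      · subst he; rw [hfb]; exact Reach.refl _
      · rcases hfa i hlt with he | ⟨j, hm, he⟩
        · rw [he]
          exact Reach.skip hlt (IH (cs.length - (i+1)) (by omega) (i+1) (by omega) rfl)
        · rw [he]
          have hij := hm.1; have hjn := hm.2.1
          exact Reach.word hm (IH (cs.length - j) (by omega) j hjn rfl)
  have reach_forw : ∀ i, i ≤ cs.length → Reach W cs 0 i (g i) := by
    intro i
    induction i using Nat.strong_induction_on with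
    | _ i IH =>
      intro hi
      match i with
      | 0 => rw [hgb]; exact Reach.refl _
      | (i+1) =>
        rcases hga i (by omega) with he | ⟨j, hm, he⟩
        · rw [he]
          exact reach_trans (IH i (by omega) (by omega)) (Reach.skip (by omega) (Reach.refl _))
        · rw [he]
          have hj := hm.1
          have h0 : Reach W cs 0 j (g j) := IH j (by omega) (by omega)
          have := reach_trans h0 (Reach.word hm (Reach.refl _))
          simpa using this
  have h1 : f 0 ≤ g cs.length := by
    have := reach_f (reach_forw cs.length le_rfl); omega
  have h2 : g cs.length ≤ f 0 := by
    have := reach_g (reach_back (cs.length) 0 (by omega) rfl); omega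
  omega

-- ---------- trie semantics ----------

def lookupT : PTrie → List Char → Option PTrie
  | t, [] => some t
  | t, c :: p =>
    match PTrieKids.find? (PTrie.kids t) c with
    | none => none
    | some t' => lookupT t' p

def hasLenAtB (t : PTrie) (p : List Char) : Bool :=
  match lookupT t p with
  | some t' => (PTrie.lenTag t').isSome
  | none => false

theorem find?_kidsInsert (ch : PTrieKids) (c : Char) (rest : List Char) (L : Int) (c' : Char) :
    PTrieKids.find? (kidsInsert ch c rest L) c' =
      if c = c' then some (trieInsert ((PTrieKids.find? ch c).getD (.mk none .nil)) rest L)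
      else PTrieKids.find? ch c' :=
  match ch with
  | .nil => by simp [kidsInsert, PTrieKids.find?]
  | .cons c0 t0 tl => by
    by_cases h0 : c0 = c
    · subst h0
      rw [kidsInsert, if_pos rfl]
      by_cases h1 : c0 = c' <;> simp [PTrieKids.find?, h1]
    · rw [kidsInsert, if_neg h0]
      simp only [PTrieKids.find?]
      rw [find?_kidsInsert tl c rest L c']
      by_cases h1 : c0 = c'
      · subst h1
        simp [h0, Ne.symm h0, PTrieKids.find?]
      · by_cases h2 : c = c' <;> simp [h0, h1, h2, PTrieKids.find?]

theorem hasLenAtB_empty (p : List Char) :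
    hasLenAtB (PTrie.mk none .nil) p = false := by
  cases p <;> simp [hasLenAtB, lookupT, PTrie.kids, PTrie.lenTag, PTrieKids.find?]

theorem hasLenAtB_trieInsert (w : List Char) (t : PTrie) (L : Int) (p : List Char) :
    hasLenAtB (trieInsert t w L) p = (hasLenAtB t p || p == w) := by
  induction w generalizing t p with
  | nil =>
    cases t with | mk m ch =>
    cases p with
    | nil => simp [trieInsert, hasLenAtB, lookupT, PTrie.lenTag]
    | cons c' p' => simp [trieInsert, hasLenAtB, lookupT, PTrie.kids]
  | cons c rest ih =>
    cases t with | mk m ch =>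
    cases p with
    | nil => simp [trieInsert, hasLenAtB, lookupT, PTrie.lenTag]
    | cons c' p' =>
      by_cases hc : c = c'
      · subst hc
        rw [trieInsert, hasLenAtB]
        show (match (match PTrieKids.find? (PTrie.kids (PTrie.mk m (kidsInsert ch c rest L))) c with
              | none => none | some t' => lookupT t' p') with
              | some t' => (PTrie.lenTag t').isSome | none => false) = _
        rw [PTrie.kids, find?_kidsInsert, if_pos rfl]
        cases hf : PTrieKids.find? ch c with
        | none =>
          have h1 : hasLenAtB (trieInsert (PTrie.mk none .nil) rest L) p'
              = (hasLenAtB (PTrie.mk none .nil) p' || p' == rest) := ih _ _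
          rw [hasLenAtB_empty] at h1
          simp only [Option.getD_none]
          rw [show (match lookupT (trieInsert (PTrie.mk none .nil) rest L) p' with
                    | some t' => (PTrie.lenTag t').isSome | none => false)
              = hasLenAtB (trieInsert (PTrie.mk none .nil) rest L) p' from rfl]
          rw [h1]
          simp [hasLenAtB, lookupT, PTrie.kids, hf]
        | some u =>
          simp only [Option.getD_some]
          rw [show (match lookupT (trieInsert u rest L) p' with
                    | some t' => (PTrie.lenTag t').isSome | none => false)
              = hasLenAtB (trieInsert u rest L) p' from rfl]
          rw [ih]
          simp [hasLenAtB, lookupT, PTrie.kids, hf]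
      · rw [trieInsert, hasLenAtB]
        show (match (match PTrieKids.find? (PTrie.kids (PTrie.mk m (kidsInsert ch c rest L))) c' with
              | none => none | some t' => lookupT t' p') with
              | some t' => (PTrie.lenTag t').isSome | none => false) = _
        rw [PTrie.kids, find?_kidsInsert, if_neg hc]
        have hne : (c' :: p' == c :: rest) = false := by
          simp; intro h; exact absurd h.symm hc
        rw [hne]
        simp [hasLenAtB, lookupT, PTrie.kids]

theorem lookupT_append (t : PTrie) (p q : List Char) :
    lookupT t (p ++ q) = (lookupT t p).bind (fun t' => lookupT t' q) := by
  induction p generalizing t with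
  | nil => simp [lookupT]
  | cons c p' ih =>
    cases hf : PTrieKids.find? (PTrie.kids t) c with
    | none => simp [lookupT, hf]
    | some t' => simp [lookupT, hf, ih]

def buildTrie (W : List String) : PTrie :=
  W.foldl (fun t w => trieInsert t w.toList (PySem.Str.len w)) (.mk none .nil)

theorem hasLenAtB_foldl (W : List String) (t0 : PTrie) (p : List Char) :
    hasLenAtB (W.foldl (fun t w => trieInsert t w.toList (PySem.Str.len w)) t0) p
      = (hasLenAtB t0 p || W.any (fun w => p == w.toList)) := by
  induction W generalizing t0 with
  | nil => simp
  | cons w ws ih =>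
    rw [List.foldl_cons, ih, hasLenAtB_trieInsert]
    simp [Bool.or_assoc]

theorem hasLenAtB_buildTrie (W : List String) (p : List Char) :
    hasLenAtB (buildTrie W) p = W.any (fun w => p == w.toList) := by
  rw [buildTrie, hasLenAtB_foldl]
  cases p <;> simp [hasLenAtB, lookupT, PTrie.lenTag, PTrie.kids, PTrieKids.find?]

theorem hasLenAtB_iff_mem (W : List String) (p : List Char) :
    hasLenAtB (buildTrie W) p = true ↔ String.ofList p ∈ W := by
  rw [hasLenAtB_buildTrie]
  simp only [List.any_eq_true, beq_iff_eq]
  constructor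
  · rintro ⟨w, hw, rfl⟩; simpa using hw
  · intro h; exact ⟨String.ofList p, h, by simp⟩

/-- every prefix of a reachable path is reachable -/
theorem lookupT_isSome_of_append (t : PTrie) (p q : List Char)
    (h : (lookupT t (p ++ q)).isSome = true) : (lookupT t p).isSome = true := by
  rw [lookupT_append] at h
  cases hp : lookupT t p with
  | none => rw [hp] at h; simp at h
  | some _ => rfl

theorem hasLenAt_reachable_t (t : PTrie) (p q : List Char)
    (h : hasLenAtB t (p ++ q) = true) :
    (lookupT t p).isSome = true := by
  have : (lookupT t (p ++ q)).isSome = true := by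
    unfold hasLenAtB at h
    cases hl : lookupT t (p ++ q) with
    | none => rw [hl] at h; simp at h
    | some _ => simp [hl]
  exact lookupT_isSome_of_append _ _ _ this

-- ---------- characterization of A's inner loop ----------

def pathOf (cs : List Char) (i k : ℕ) : List Char := (cs.drop i).take (k - i)

theorem pathOf_self (cs : List Char) (i : ℕ) : pathOf cs i i = [] := by
  simp [pathOf]

theorem pathOf_succ (cs : List Char) (i j : ℕ) (h1 : i ≤ j) (h2 : j < cs.length) :
    pathOf cs i (j + 1) = pathOf cs i j ++ [cs[j]] := by
  unfold pathOf
  have : j + 1 - i = (j - i) + 1 := by omega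
  rw [this, List.take_succ]
  congr 1
  have : (cs.drop i)[j - i]? = some cs[j] := by
    rw [List.getElem?_drop]
    have : i + (j - i) = j := by omega
    rw [this, List.getElem?_eq_getElem h2]
  simp [this]

theorem pathOf_prefix (cs : List Char) (i j k : ℕ) (h : j ≤ k) :
    pathOf cs i j <+: pathOf cs i k := by
  unfold pathOf
  have : ((cs.drop i).take (k - i)).take (j - i) = (cs.drop i).take (j - i) := by
    rw [List.take_take]
    congr 1
    omega
  rw [← this]
  exact List.take_prefix _ _

theorem lookupT_single (t : PTrie) (c : Char) :
    lookupT t [c] = PTrieKids.find? (PTrie.kids t) c := by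
  rw [lookupT]
  cases PTrieKids.find? (PTrie.kids t) c <;> simp [lookupT]

theorem innerA_spec (cs : List Char) (dp : List Int) (trie : PTrie)
    (hdp : ∀ k : ℕ, 0 ≤ dp.getD k 0) :
    ∀ (m j i : ℕ) (t : PTrie) (cur : Int), cs.length - j = m →
      i ≤ j → j ≤ cs.length →
      lookupT trie (pathOf cs i j) = some t →
      0 ≤ cur →
      (innerA cs dp (PySem.List.pyRange (j : Int) (cs.length : Int) 1) t cur ≤ cur)
      ∧ (∀ k : ℕ, j < k → k ≤ cs.length → hasLenAtB trie (pathOf cs i k) = true →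
          innerA cs dp (PySem.List.pyRange (j : Int) (cs.length : Int) 1) t cur ≤ dp.getD k 0)
      ∧ (innerA cs dp (PySem.List.pyRange (j : Int) (cs.length : Int) 1) t cur = cur
         ∨ ∃ k : ℕ, j < k ∧ k ≤ cs.length ∧ hasLenAtB trie (pathOf cs i k) = true
             ∧ innerA cs dp (PySem.List.pyRange (j : Int) (cs.length : Int) 1) t cur = dp.getD k 0) := by
  intro m
  induction m using Nat.strong_induction_on with
  | _ m IH =>
    intro j i t cur hm hij hjn hlook hcur
    rcases Nat.eq_or_lt_of_le hjn with he | hlt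
    · -- j = n : empty range
      rw [PySem.List.pyRange_one_eq_nil (by omega), innerA]
      exact ⟨le_refl _, fun k hk1 hk2 _ => absurd hk2 (by omega), Or.inl rfl⟩
    · rw [PySem.List.pyRange_one_cons (by exact_mod_cast hlt)]
      have hcast : (j : Int) + 1 = ((j + 1 : ℕ) : Int) := by push_cast; ring
      rw [hcast]
      have hget : PySem.List.pyGetD cs (j : Int) ' ' = cs[j] := by
        rw [PySem.List.pyGetD_natCast, List.getD_eq_getElem?_getD, List.getElem?_eq_getElem hlt]
        rfl
      have hstep : lookupT trie (pathOf cs i (j + 1))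
          = PTrieKids.find? (PTrie.kids t) cs[j] := by
        rw [pathOf_succ cs i j hij hlt, lookupT_append, hlook, Option.bind_some, lookupT_single]
      rw [innerA, hget]
      cases hf : PTrieKids.find? (PTrie.kids t) cs[j] with
      | none =>
        dsimp only
        refine ⟨le_refl _, fun k hk1 hk2 hlen => ?_, Or.inl rfl⟩
        exfalso
        obtain ⟨q, hq⟩ := pathOf_prefix cs i (j+1) k (by omega)
        have := hasLenAt_reachable_t trie _ q (hq ▸ hlen)
        rw [hstep, hf] at this
        simp at this
      | some t' =>
        dsimp only
        have hlook' : lookupT trie (pathOf cs i (j + 1)) = some t' := by rw [hstep, hf]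
        cases hlt' : PTrie.lenTag t' with
        | none =>
          dsimp only
          have hIH := IH (cs.length - (j+1)) (by omega) (j+1) i t' cur rfl (by omega) (by omega) hlook' hcur
          refine ⟨hIH.1, fun k hk1 hk2 hlen => ?_, ?_⟩
          · rcases Nat.eq_or_lt_of_le (Nat.succ_le_of_lt hk1) with he2 | hlt2
            · exfalso
              rw [← he2] at hlen
              simp [hasLenAtB, hlook', hlt'] at hlen
            · exact hIH.2.1 k hlt2 hk2 hlen
          · rcases hIH.2.2 with h | ⟨k, h1, h2, h3, h4⟩
            · exact Or.inl h
            · exact Or.inr ⟨k, by omega, h2, h3, h4⟩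
        | some L =>
          dsimp only
          have hdcast : (j : Int) + 1 = ((j + 1 : ℕ) : Int) := by push_cast; ring
          rw [hdcast, PySem.List.pyGetD_natCast]
          set d := dp.getD (j + 1) 0 with hd
          have hd0 : 0 ≤ d := hdp (j + 1)
          have hlen1 : hasLenAtB trie (pathOf cs i (j + 1)) = true := by
            simp [hasLenAtB, hlook', hlt']
          by_cases hz : min cur d = 0
          · rw [if_pos hz]
            refine ⟨by omega, fun k _ _ _ => by have := hdp k; omega, ?_⟩
            rcases min_choice cur d with hmc | hmc
            · exact Or.inl (by omega)
            · exact Or.inr ⟨j + 1, by omega, by omega, hlen1, by omega⟩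
          · rw [if_neg hz]
            have hc2 : 0 ≤ min cur d := le_min hcur hd0
            have hIH := IH (cs.length - (j+1)) (by omega) (j+1) i t' (min cur d) rfl (by omega) (by omega) hlook' hc2
            refine ⟨le_trans hIH.1 (min_le_left _ _), fun k hk1 hk2 hlen => ?_, ?_⟩
            · rcases Nat.eq_or_lt_of_le (Nat.succ_le_of_lt hk1) with he2 | hlt2
              · have := le_trans hIH.1 (min_le_right cur d)
                rw [← he2]; exact this
              · exact hIH.2.1 k hlt2 hk2 hlen
            · rcases hIH.2.2 with h | ⟨k, h1, h2, h3, h4⟩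
              · rcases min_choice cur d with hmc | hmc
                · exact Or.inl (by omega)
                · exact Or.inr ⟨j + 1, by omega, by omega, hlen1, by omega⟩
              · exact Or.inr ⟨k, by omega, h2, h3, h4⟩

-- ---------- A's outer loop ----------

def mtchT (trie : PTrie) (cs : List Char) (m k : ℕ) : Prop :=
  m < k ∧ k ≤ cs.length ∧ hasLenAtB trie (pathOf cs m k) = true

/-- the dp-cell facts established for position `m` once the backward loop has passed it -/
def GoodA (trie : PTrie) (cs : List Char) (dp : List Int) (m : ℕ) : Prop :=
  dp.getD m 0 ≤ dp.getD (m+1) 0 + 1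
  ∧ (∀ k, mtchT trie cs m k → dp.getD m 0 ≤ dp.getD k 0)
  ∧ (dp.getD m 0 = dp.getD (m+1) 0 + 1 ∨ ∃ k, mtchT trie cs m k ∧ dp.getD m 0 = dp.getD k 0)

theorem getD_set' (xs : List Int) (n m : ℕ) (v : Int) (h : n < xs.length) :
    (xs.set n v).getD m 0 = if m = n then v else xs.getD m 0 := by
  by_cases hm : m = n
  · subst hm; simp [List.getD_eq_getElem?_getD, List.getElem?_set, h]
  · simp [List.getD_eq_getElem?_getD, List.getElem?_set, hm, Ne.symm hm]

def stepFunA (trie : PTrie) (cs : List Char) : List Int → Int → List Int :=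
  fun dp i =>
    let dp1 := PySem.List.pySetD dp i (PySem.List.pyGetD dp (i + 1) 0 + 1)
    PySem.List.pySetD dp1 i
      (innerA cs dp1 (PySem.List.pyRange i (cs.length : Int) 1) trie
        (PySem.List.pyGetD dp1 i 0))

theorem outerA_spec (trie : PTrie) (cs : List Char) :
    ∀ (k : ℕ) (dp : List Int), k ≤ cs.length →
      dp.length = cs.length + 1 →
      (∀ m : ℕ, 0 ≤ dp.getD m 0) →
      dp.getD cs.length 0 = 0 →
      (∀ m : ℕ, k ≤ m → m < cs.length → GoodA trie cs dp m) →
      ((∀ m : ℕ, 0 ≤ (((PySem.List.pyRange ((k : Int) - 1) (-1) (-1)).foldl (stepFunA trie cs) dp)).getD m 0)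
        ∧ (((PySem.List.pyRange ((k : Int) - 1) (-1) (-1)).foldl (stepFunA trie cs) dp)).getD cs.length 0 = 0
        ∧ (∀ m : ℕ, m < cs.length →
            GoodA trie cs (((PySem.List.pyRange ((k : Int) - 1) (-1) (-1)).foldl (stepFunA trie cs) dp)) m)) := by
  intro k
  induction k with
  | zero =>
    intro dp _ _ h2 h3 h4
    rw [show ((0 : ℕ) : Int) - 1 = -1 by norm_num, PySem.List.pyRange_neg_one_eq_nil le_rfl]
    exact ⟨h2, h3, fun m hm => h4 m (by omega) hm⟩
  | succ k IH =>
    intro dp hk h1 h2 h3 h4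
    have hkn : k < cs.length := by omega
    have hkl : k < dp.length := by omega
    rw [show ((k + 1 : ℕ) : Int) - 1 = (k : Int) by push_cast; ring,
      PySem.List.pyRange_neg_one_cons (by omega), List.foldl_cons]
    -- analyse one step of the loop at position k
    set dp1 := PySem.List.pySetD dp (k : Int) (PySem.List.pyGetD dp ((k : Int) + 1) 0 + 1) with hdp1
    have hdp1' : dp1 = dp.set k (dp.getD (k + 1) 0 + 1) := by
      rw [hdp1, show ((k : Int) + 1) = ((k + 1 : ℕ) : Int) by push_cast; ring,
        PySem.List.pyGetD_natCast, PySem.List.pySetD_natCast]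
    have hlen1 : dp1.length = cs.length + 1 := by rw [hdp1']; simp [h1]
    have hget1 : ∀ m : ℕ, dp1.getD m 0 = if m = k then dp.getD (k + 1) 0 + 1 else dp.getD m 0 := by
      intro m; rw [hdp1']; exact getD_set' dp k m _ hkl
    have hnn1 : ∀ m : ℕ, 0 ≤ dp1.getD m 0 := by
      intro m; rw [hget1]; split
      · have := h2 (k + 1); omega
      · exact h2 m
    have hcur : PySem.List.pyGetD dp1 (k : Int) 0 = dp.getD (k + 1) 0 + 1 := by
      rw [PySem.List.pyGetD_natCast, hget1, if_pos rfl]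
    have hspec := innerA_spec cs dp1 trie hnn1 (cs.length - k) k k trie
      (PySem.List.pyGetD dp1 (k : Int) 0) rfl le_rfl (by omega)
      (by rw [pathOf_self]; rfl) (by rw [hcur]; have := h2 (k + 1); omega)
    set r := innerA cs dp1 (PySem.List.pyRange (k : Int) (cs.length : Int) 1) trie
      (PySem.List.pyGetD dp1 (k : Int) 0) with hr
    -- the array after this iteration
    have hstep : stepFunA trie cs dp (k : Int) = dp1.set k r := by
      rw [stepFunA]
      show PySem.List.pySetD dp1 (k : Int) r = dp1.set k r
      rw [PySem.List.pySetD_natCast]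
    have hget2 : ∀ m : ℕ, (dp1.set k r).getD m 0 = if m = k then r else dp.getD m 0 := by
      intro m
      rw [getD_set' dp1 k m r (by omega), hget1]
      by_cases hm : m = k <;> simp [hm]
    have hr_nonneg : 0 ≤ r := by
      rcases hspec.2.2 with he | ⟨k', _, _, _, he⟩
      · rw [he, hcur]; have := h2 (k + 1); omega
      · rw [he]; exact hnn1 k'
    -- dp1.set k r satisfies the invariant one position lower
    rw [hstep]
    apply IH (dp1.set k r) (by omega) (by simp [hlen1]) (fun m => by
        rw [hget2]; split
        · exact hr_nonneg
        · exact h2 m)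
      (by rw [hget2, if_neg (by omega)]; exact h3)
    intro m hm1 hm2
    rcases Nat.eq_or_lt_of_le hm1 with he | hlt
    · -- the freshly computed cell
      subst he
      refine ⟨?_, ?_, ?_⟩
      · rw [hget2, if_pos rfl, hget2, if_neg (by omega)]
        have := hspec.1; rw [hcur] at this; omega
      · intro k' hk'
        have hkk := hk'.1
        rw [hget2, if_pos rfl, hget2, if_neg (by omega)]
        have h5 := hspec.2.1 k' hk'.1 hk'.2.1 hk'.2.2
        rw [hget1, if_neg (by omega)] at h5
        exact h5
      · rcases hspec.2.2 with he | ⟨k', hk1, hk2, hk3, he⟩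
        · left
          rw [hget2, if_pos rfl, hget2, if_neg (by omega), he, hcur]
        · right
          refine ⟨k', ⟨hk1, hk2, hk3⟩, ?_⟩
          rw [hget2, if_pos rfl, hget2, if_neg (by omega), he, hget1, if_neg (by omega)]
    · -- cells already finished are untouched
      have hg := h4 m (by omega) hm2
      refine ⟨?_, ?_, ?_⟩
      · rw [hget2, if_neg (by omega), hget2, if_neg (by omega)]
        exact hg.1
      · intro k' hk'
        have hkk := hk'.1
        rw [hget2, if_neg (by omega), hget2, if_neg (by omega)]
        exact hg.2.1 k' hk'
      · rcases hg.2.2 with he | ⟨k', hk', he⟩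
        · left; rw [hget2, if_neg (by omega), hget2, if_neg (by omega)]; exact he
        · right
          refine ⟨k', hk', ?_⟩
          have hkk := hk'.1
          rw [hget2, if_neg (by omega), hget2, if_neg (by omega)]
          exact he

-- ---------- B's loops ----------

theorem foldl_min_if (P : Int → Bool) (v : Int → Int) :
    ∀ (l : List Int) (a : Int),
      (l.foldl (fun b j => if P j then min b (v j) else b) a ≤ a)
      ∧ (∀ j ∈ l, P j = true → l.foldl (fun b j => if P j then min b (v j) else b) a ≤ v j)
      ∧ (l.foldl (fun b j => if P j then min b (v j) else b) a = a
         ∨ ∃ j ∈ l, P j = true ∧ l.foldl (fun b j => if P j then min b (v j) else b) a = v j) := by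
  intro l
  induction l with
  | nil => intro a; simp
  | cons x xs ih =>
    intro a
    rw [List.foldl_cons]
    by_cases hp : P x = true
    · rw [if_pos hp]
      obtain ⟨h1, h2, h3⟩ := ih (min a (v x))
      refine ⟨le_trans h1 (min_le_left _ _), ?_, ?_⟩
      · intro j hj hPj
        rcases List.mem_cons.mp hj with he | hm
        · subst he; exact le_trans h1 (min_le_right _ _)
        · exact h2 j hm hPj
      · rcases h3 with he | ⟨j, hj, hPj, he⟩
        · rcases min_choice a (v x) with hmc | hmc
          · exact Or.inl (by omega)
          · exact Or.inr ⟨x, List.mem_cons_self, hp, by omega⟩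
        · exact Or.inr ⟨j, List.mem_cons_of_mem _ hj, hPj, he⟩
    · rw [if_neg hp]
      obtain ⟨h1, h2, h3⟩ := ih a
      refine ⟨h1, ?_, ?_⟩
      · intro j hj hPj
        rcases List.mem_cons.mp hj with he | hm
        · subst he; exact absurd hPj hp
        · exact h2 j hm hPj
      · rcases h3 with he | ⟨j, hj, hPj, he⟩
        · exact Or.inl he
        · exact Or.inr ⟨j, List.mem_cons_of_mem _ hj, hPj, he⟩

theorem maxlen_ge (W : List String) (w : String) (hw : w ∈ W) :
    PySem.Str.len w ≤ (PySem.List.max? (W.map PySem.Str.len) (fun x => x)).getD 0 := by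
  cases hM : PySem.List.max? (W.map PySem.Str.len) (fun x => x) with
  | none =>
    rw [PySem.List.max?_eq_none_iff] at hM
    simp at hM
    subst hM
    simp at hw
  | some m =>
    have := PySem.List.max?_isMax hM (PySem.Str.len w) (List.mem_map_of_mem hw)
    simpa using this

def stepFunB (words : PySem.Set String) (maxlen : Int) (sentence : String) :
    List Int → Int → List Int :=
  fun dp i =>
    let best := (PySem.List.pyRange (max 0 (i - maxlen)) i 1).foldl
      (fun best j =>
        if PySem.Set.contains words (PySem.Str.slice sentence (some j) (some i))
        then min best (PySem.List.pyGetD dp j 0) else best)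
      (PySem.List.pyGetD dp (i - 1) 0 + 1)
    PySem.List.pySetD dp i best

/-- the dp-cell facts for the forward loop, about position `i+1` -/
def GoodB (W : List String) (cs : List Char) (dp : List Int) (i : ℕ) : Prop :=
  dp.getD (i+1) 0 ≤ dp.getD i 0 + 1
  ∧ (∀ j : ℕ, mtch W cs j (i+1) → dp.getD (i+1) 0 ≤ dp.getD j 0)
  ∧ (dp.getD (i+1) 0 = dp.getD i 0 + 1
     ∨ ∃ j : ℕ, mtch W cs j (i+1) ∧ dp.getD (i+1) 0 = dp.getD j 0)

theorem pyGetD_toNat (xs : List Int) (j : Int) (h : 0 ≤ j) :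
    PySem.List.pyGetD xs j 0 = xs.getD j.toNat 0 := by
  conv_lhs => rw [← Int.toNat_of_nonneg h]
  rw [PySem.List.pyGetD_natCast]

def maxlenW (W : List String) : Int :=
  (PySem.List.max? (W.map PySem.Str.len) (fun x => x)).getD 0

def dpB (W : List String) (sentence : String) (k : ℕ) : List Int :=
  (PySem.List.pyRange 1 ((k : Int) + 1)).foldl
    (stepFunB (PySem.Set.ofList W) (maxlenW W) sentence)
    (List.replicate (sentence.toList.length + 1) 0)

theorem dpB_succ (W : List String) (sentence : String) (k : ℕ) :
    dpB W sentence (k + 1)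
      = stepFunB (PySem.Set.ofList W) (maxlenW W) sentence (dpB W sentence k) ((k : Int) + 1) := by
  unfold dpB
  rw [show ((k + 1 : ℕ) : Int) + 1 = ((k : Int) + 1) + 1 by push_cast; ring,
    PySem.List.pyRange_one_succ_right (by omega), List.foldl_append, List.foldl_cons, List.foldl_nil]

theorem outerB_spec (W : List String) (sentence : String) :
    ∀ (k : ℕ), k ≤ sentence.toList.length →
      (dpB W sentence k).length = sentence.toList.length + 1
      ∧ (∀ m : ℕ, 0 ≤ (dpB W sentence k).getD m 0)
      ∧ (dpB W sentence k).getD 0 0 = 0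
      ∧ (∀ i : ℕ, i < k → GoodB W sentence.toList (dpB W sentence k) i) := by
  intro k
  induction k with
  | zero =>
    intro _
    unfold dpB
    rw [show ((0 : ℕ) : Int) + 1 = 1 by norm_num, PySem.List.pyRange_one_eq_nil le_rfl, List.foldl_nil]
    refine ⟨by simp, fun m => by simp [List.getD_eq_getElem?_getD],
      by simp [List.getD_eq_getElem?_getD], fun i hi => absurd hi (by omega)⟩
  | succ k IH =>
    intro hk
    obtain ⟨h1, h2, h3, h4⟩ := IH (by omega)
    set cs := sentence.toList with hcs
    set n := cs.length with hn
    set dp := dpB W sentence k with hdp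
    rw [dpB_succ]
    rw [stepFunB]
    set i : Int := (k : Int) + 1 with hi
    have hicast : i = ((k + 1 : ℕ) : Int) := by rw [hi]; push_cast; ring
    have hinit : PySem.List.pyGetD dp (i - 1) 0 + 1 = dp.getD k 0 + 1 := by
      rw [show i - 1 = ((k : ℕ) : Int) by omega, PySem.List.pyGetD_natCast]
    -- the inner fold
    obtain ⟨f1, f2, f3⟩ := foldl_min_if
      (fun j => PySem.Set.contains (PySem.Set.ofList W) (PySem.Str.slice sentence (some j) (some i)))
      (fun j => PySem.List.pyGetD dp j 0)
      (PySem.List.pyRange (max 0 (i - maxlenW W)) i 1)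
      (PySem.List.pyGetD dp (i - 1) 0 + 1)
    set best := (PySem.List.pyRange (max 0 (i - maxlenW W)) i 1).foldl
      (fun best j =>
        if PySem.Set.contains (PySem.Set.ofList W) (PySem.Str.slice sentence (some j) (some i))
        then min best (PySem.List.pyGetD dp j 0) else best)
      (PySem.List.pyGetD dp (i - 1) 0 + 1) with hbest
    -- slices in range are pathOf's
    have hslice : ∀ jn : ℕ, jn < k + 1 →
        PySem.Str.slice sentence (some (jn : Int)) (some i)
          = String.ofList (pathOf cs jn (k + 1)) := by
      intro jn _
      rw [show PySem.Str.slice sentence (some (jn : Int)) (some i)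
          = String.ofList (PySem.Chars.slice sentence.toList (some (jn : Int)) (some i)) from rfl,
        hicast]
      congr 1
      show PySem.List.slice cs (some (jn : Int)) (some ((k + 1 : ℕ) : Int)) = _
      rw [PySem.List.slice_toNat cs (by omega) (by omega), pathOf]
      simp
    have hmemP : ∀ jn : ℕ, mtch W cs jn (k + 1) →
        ((max 0 (i - maxlenW W)) ≤ (jn : Int) ∧ (jn : Int) < i) := by
      intro jn hm
      obtain ⟨hj1, hj2, hj3⟩ := hm
      constructor
      · rw [max_le_iff]
        refine ⟨by omega, ?_⟩
        have hlen := maxlen_ge W _ hj3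
        rw [PySem.Str.len_eq] at hlen
        rw [show (String.ofList (List.take (k + 1 - jn) (List.drop jn cs))).toList
            = List.take (k + 1 - jn) (List.drop jn cs) by simp] at hlen
        have hplen : (List.take (k + 1 - jn) (List.drop jn cs)).length = k + 1 - jn := by
          simp
          omega
        rw [hplen] at hlen
        unfold maxlenW
        omega
      · omega
    have hgoal : (PySem.List.pySetD dp i best).length = n + 1
        ∧ (∀ m : ℕ, 0 ≤ (PySem.List.pySetD dp i best).getD m 0)
        ∧ (PySem.List.pySetD dp i best).getD 0 0 = 0
        ∧ (∀ m : ℕ, m < k + 1 → GoodB W cs (PySem.List.pySetD dp i best) m) := by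
      have hset : PySem.List.pySetD dp i best = dp.set (k + 1) best := by
        rw [hicast, PySem.List.pySetD_natCast]
      have hkl : k + 1 < dp.length := by omega
      have hget : ∀ m : ℕ, (PySem.List.pySetD dp i best).getD m 0
          = if m = k + 1 then best else dp.getD m 0 := by
        intro m; rw [hset]; exact getD_set' dp (k+1) m best hkl
      -- facts about best
      have hb1 : best ≤ dp.getD k 0 + 1 := by rw [hbest]; rw [hinit] at f1; exact f1
      have hb2 : ∀ jn : ℕ, mtch W cs jn (k + 1) → best ≤ dp.getD jn 0 := by
        intro jn hm
        have hmem := hmemP jn hm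
        have hPj : PySem.Set.contains (PySem.Set.ofList W)
            (PySem.Str.slice sentence (some (jn : Int)) (some i)) = true := by
          rw [hslice jn hm.1]
          simp [PySem.Set.contains, PySem.Set.mem_ofList]
          exact hm.2.2
        have := f2 (jn : Int) (by rw [PySem.List.mem_pyRange_one]; exact hmem) hPj
        rw [PySem.List.pyGetD_natCast] at this
        exact this
      have hb3 : best = dp.getD k 0 + 1
          ∨ ∃ jn : ℕ, mtch W cs jn (k + 1) ∧ best = dp.getD jn 0 := by
        rcases f3 with he | ⟨j, hj, hPj, he⟩
        · left; rw [he]; exact hinit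
        · right
          rw [PySem.List.mem_pyRange_one] at hj
          have hj0 : 0 ≤ j := le_trans (le_max_left 0 _) hj.1
          have hji : j < i := hj.2
          refine ⟨j.toNat, ?_, ?_⟩
          · have hjn : (j.toNat : Int) = j := Int.toNat_of_nonneg hj0
            refine ⟨by omega, by omega, ?_⟩
            have := hslice j.toNat (by omega)
            rw [hjn] at this
            rw [this] at hPj
            simp [PySem.Set.contains, PySem.Set.mem_ofList] at hPj
            exact hPj
          · rw [he]; exact pyGetD_toNat dp j hj0
      have hbnn : 0 ≤ best := by
        rcases hb3 with he | ⟨jn, _, he⟩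
        · have := h2 k; omega
        · have := h2 jn; omega
      refine ⟨by rw [hset]; simp [h1], ?_, ?_, ?_⟩
      · intro m; rw [hget]; split
        · exact hbnn
        · exact h2 m
      · rw [hget, if_neg (by omega)]; exact h3
      · intro m hm
        rcases Nat.lt_succ_iff_lt_or_eq.mp hm with hlt | he
        · have hg := h4 m hlt
          refine ⟨?_, ?_, ?_⟩
          · rw [hget, if_neg (by omega), hget, if_neg (by omega)]; exact hg.1
          · intro j hj
            have hjm := hj.1
            rw [hget, if_neg (by omega), hget, if_neg (by omega)]
            exact hg.2.1 j hj
          · rcases hg.2.2 with he2 | ⟨j, hj, he2⟩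
            · left; rw [hget, if_neg (by omega), hget, if_neg (by omega)]; exact he2
            · right
              refine ⟨j, hj, ?_⟩
              have hjm := hj.1
              rw [hget, if_neg (by omega), hget, if_neg (by omega)]
              exact he2
        · subst he
          refine ⟨?_, ?_, ?_⟩
          · rw [hget, if_pos rfl, hget, if_neg (by omega)]; exact hb1
          · intro j hj
            have hjm := hj.1
            rw [hget, if_pos rfl, hget, if_neg (by omega)]
            exact hb2 j hj
          · rcases hb3 with he2 | ⟨jn, hjn, he2⟩
            · left; rw [hget, if_pos rfl, hget, if_neg (by omega)]; exact he2
            · right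
              refine ⟨jn, hjn, ?_⟩
              have hjm := hjn.1
              rw [hget, if_pos rfl, hget, if_neg (by omega)]
              exact he2
    exact hgoal

-- ===== VERDICT (by name: the statement is the Claim_ definition above) =====
-- mtch and the trie characterization coincide
theorem mtchT_iff_mtch (W : List String) (cs : List Char) (j i : ℕ) :
    mtchT (buildTrie W) cs j i ↔ mtch W cs j i := by
  unfold mtchT mtch
  rw [show pathOf cs j i = (cs.drop j).take (i - j) from rfl, hasLenAtB_iff_mem]

theorem respace_spec : Claim_equal_respace := by
  intro W s _
  unfold Spec_respace
  have hlen : PySem.Str.len s = (s.toList.length : Int) := PySem.Str.len_eq s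
  set cs := s.toList with hcs
  set n := cs.length with hn
  -- ---- A side ----
  obtain ⟨hAnn, hA0, hAg⟩ := outerA_spec (buildTrie W) cs n (List.replicate (n + 1) 0) le_rfl
    (by simp [hn]) (fun m => by simp [List.getD_eq_getElem?_getD])
    (by simp [List.getD_eq_getElem?_getD]) (fun m h1 h2 => absurd h2 (by omega))
  set dpF := (PySem.List.pyRange ((n : Int) - 1) (-1) (-1)).foldl (stepFunA (buildTrie W) cs)
    (List.replicate (n + 1) 0) with hdpF
  have hAeq : respace W s = dpF.getD 0 0 := by
    unfold respace
    rw [hlen]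
    dsimp only
    rw [show ((n : Int) + 1).toNat = n + 1 by omega]
    rw [PySem.List.pyGetD_zero]
    rfl
  -- ---- B side ----
  obtain ⟨hBl, hBnn, hB0, hBg⟩ := outerB_spec W s n le_rfl
  have hBeq : respace_alt W s = (dpB W s n).getD n 0 := by
    unfold respace_alt dpB stepFunB maxlenW
    rw [hlen]
    dsimp only
    rw [show ((n : Int) + 1).toNat = n + 1 by omega]
    rw [pyGetD_toNat _ _ (by omega)]
    rw [show ((n : Int)).toNat = n by omega]
  -- ---- the two value functions ----
  rw [hAeq, hBeq]
  exact back_eq_forw W cs (fun m => dpF.getD m 0) (fun m => (dpB W s n).getD m 0)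
    hA0
    (fun i hi => (hAg i hi).1)
    (fun i j hm => (hAg i (hm.1.trans_le hm.2.1)).2.1 j ((mtchT_iff_mtch W cs i j).mpr hm))
    (fun i hi => by
      rcases (hAg i hi).2.2 with he | ⟨k, hk, he⟩
      · exact Or.inl he
      · exact Or.inr ⟨k, (mtchT_iff_mtch W cs i k).mp hk, he⟩)
    hB0
    (fun i hi => (hBg i hi).1)
    (fun j i hm => by
      have hi1 : 1 ≤ i := by have := hm.1; omega
      obtain ⟨i', rfl⟩ : ∃ i', i = i' + 1 := ⟨i - 1, by omega⟩
      exact (hBg i' (by have := hm.2.1; omega)).2.1 j hm)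
    (fun i hi => (hBg i hi).2.2)
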